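-- pv_equiv track=rewrite | github.com/MrHamdulay/csc3-capstone | examples/data/Assignment_7/oslcon001/push.py | space_right
-- ===== SOURCE A (Python) =====
-- def space_right(grid):
--     for x in range(3):
--         for row in range(4):
--             for col in range(3):
--                 if grid[row][3-col] == 0:
--                     grid[row][3-col] = grid[row][2-col]
--                     grid[row][2-col] = 0
--     return grid
-- ===== SOURCE B (Python) =====
-- def space_right(grid):
--     for row in range(4):
--         r = grid[row]
--         vals = [r[c] for c in range(4) if r[c] != 0]
--         r[:4] = [0] * (4 - len(vals)) + vals
--     return grid
-- ===== Notes on version B (the rewrite author's own statement) =====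
-- stated objective: simpler
-- what changed: Replaces A's three full bubbling passes (3x4x3 conditional adjacent shifts) with a single collect-then-place pass per row: gather the non-zero values of columns 0..3 and write them back right-aligned, padding the left with zeros.
import Mathlib
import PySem

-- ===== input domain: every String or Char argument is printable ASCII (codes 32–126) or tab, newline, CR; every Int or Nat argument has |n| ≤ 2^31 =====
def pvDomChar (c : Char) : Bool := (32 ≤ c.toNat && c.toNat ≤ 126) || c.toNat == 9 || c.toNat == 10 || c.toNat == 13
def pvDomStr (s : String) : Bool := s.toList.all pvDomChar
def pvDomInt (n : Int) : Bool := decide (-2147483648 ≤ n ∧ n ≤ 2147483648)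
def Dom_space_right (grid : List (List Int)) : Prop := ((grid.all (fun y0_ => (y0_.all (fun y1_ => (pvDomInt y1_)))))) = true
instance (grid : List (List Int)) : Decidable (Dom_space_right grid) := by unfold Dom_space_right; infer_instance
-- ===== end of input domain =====

-- B replaces A's three repeated right-bubbling passes by one collect-nonzeros-then-right-align
-- pass per row (objective: simpler). A mutates the grid in place and returns it; this file is
-- about the returned value (B performs the analogous in-place mutation in Python).

-- ===== PORT A =====
-- one iteration of A's innermost body: at row `row` and col `col`, conditionally shift right
def stepA (g : List (List Int)) (row col : Nat) : List (List Int) :=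
  if (g.getD row []).getD (3 - col) 0 = 0 then
    g.set row (((g.getD row []).set (3 - col) ((g.getD row []).getD (2 - col) 0)).set (2 - col) 0)
  else g

def space_right (grid : List (List Int)) : List (List Int) :=
  (List.range 3).foldl (fun g _ =>
    (List.range 4).foldl (fun g row =>
      (List.range 3).foldl (fun g col => stepA g row col) g) g) grid

-- ===== PORT B =====
-- B's per-row body: collect the non-zero values of columns 0..3, write them back right-aligned
def rowB (r : List Int) : List Int :=
  let vals := ((List.range 4).map (fun c => r.getD c 0)).filter (fun v => v ≠ 0)
  (List.replicate (4 - vals.length) 0 ++ vals) ++ r.drop 4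

def space_right_alt (grid : List (List Int)) : List (List Int) :=
  (List.range 4).foldl (fun g row => g.set row (rowB (g.getD row []))) grid

-- ===== PRECONDITION & SPEC =====
-- A raises IndexError when the grid has fewer than 4 rows or any of the first 4 rows has
-- fewer than 4 columns; exactly those inputs are excluded (B raises there too).
def Pre_space_right (grid : List (List Int)) : Prop :=
  4 ≤ grid.length ∧ ∀ r ∈ grid.take 4, 4 ≤ r.length
instance (grid : List (List Int)) : Decidable (Pre_space_right grid) := by
  unfold Pre_space_right; infer_instance

def pvWitness_space_right : List (List Int) :=
  [[0, 2, 0, 4], [1, 0, 3, 0], [0, 0, 0, 0], [5, 6, 7, 8]]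

def Spec_space_right (grid : List (List Int)) (out : List (List Int)) : Prop := out = space_right_alt grid
instance (grid : List (List Int)) (out : List (List Int)) : Decidable (Spec_space_right grid out) := by unfold Spec_space_right; infer_instance

-- ===== CLAIM (what is proved, stated in full; the proofs are below) =====
def Claim_equal_space_right : Prop := ∀ (grid : List (List Int)), Dom_space_right grid → Pre_space_right grid → Spec_space_right grid (space_right grid)

-- ===== LEMMAS AND PROOFS =====

-- A's inner-loop body, restricted to the row it touches
def rowStep (r : List Int) (col : Nat) : List Int :=
  if r.getD (3 - col) 0 = 0 then (r.set (3 - col) (r.getD (2 - col) 0)).set (2 - col) 0 else r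

-- one pass of A's col-loop over one row
def passA (r : List Int) : List Int := (List.range 3).foldl rowStep r

lemma stepA_eq (g : List (List Int)) (row col : Nat) (h : row < g.length) :
    stepA g row col = g.set row (rowStep (g.getD row []) col) := by
  unfold stepA rowStep
  split
  · rfl
  · rw [List.getD_eq_getElem _ _ h]
    exact (List.set_getElem_self h).symm

lemma inner_fold (g : List (List Int)) (row : Nat) (h : row < g.length) :
    stepA (stepA (stepA g row 0) row 1) row 2 = g.set row (passA (g.getD row [])) := by
  rw [stepA_eq g row 0 h,
      stepA_eq _ row 1 (by simpa using h),
      stepA_eq _ row 2 (by simpa using h)]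
  rw [List.set_set, List.set_set]
  simp [List.getD, List.getElem?_set_self h, passA, List.range_succ]

lemma middle_fold (s0 s1 s2 s3 : List Int) (rest : List (List Int)) :
    (List.range 4).foldl (fun g row => stepA (stepA (stepA g row 0) row 1) row 2)
      (s0 :: s1 :: s2 :: s3 :: rest)
    = passA s0 :: passA s1 :: passA s2 :: passA s3 :: rest := by
  rw [show (List.range 4) = [0, 1, 2, 3] from rfl]
  simp only [List.foldl]
  rw [inner_fold _ 0 (by simp), inner_fold _ 1 (by simp), inner_fold _ 2 (by simp),
      inner_fold _ 3 (by simp)]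
  simp [List.set, List.getD]

lemma row_eq (a b c d : Int) (t : List Int) :
    passA (passA (passA (a :: b :: c :: d :: t))) = rowB (a :: b :: c :: d :: t) := by
  by_cases ha : a = 0 <;> by_cases hb : b = 0 <;> by_cases hc : c = 0 <;> by_cases hd : d = 0 <;>
    simp [passA, rowStep, rowB, List.range_succ, ha, hb, hc, hd, List.getD, List.set]

theorem space_right_spec : Claim_equal_space_right := by
  intro grid _ hpre
  obtain ⟨hlen, hrows⟩ := hpre
  match grid, hlen with
  | r0 :: r1 :: r2 :: r3 :: rest, _ =>
    have h0 : 4 ≤ r0.length := hrows r0 (by simp)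
    have h1 : 4 ≤ r1.length := hrows r1 (by simp)
    have h2 : 4 ≤ r2.length := hrows r2 (by simp)
    have h3 : 4 ≤ r3.length := hrows r3 (by simp)
    match r0, h0, r1, h1, r2, h2, r3, h3 with
    | a0::b0::c0::d0::t0, _, a1::b1::c1::d1::t1, _, a2::b2::c2::d2::t2, _, a3::b3::c3::d3::t3, _ =>
      show space_right _ = space_right_alt _
      unfold space_right
      simp only [show (List.range 3) = [0, 1, 2] from rfl, List.foldl]
      rw [middle_fold, middle_fold, middle_fold]
      unfold space_right_alt
      simp only [show (List.range 4) = [0, 1, 2, 3] from rfl, List.foldl]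
      simp only [List.set, List.getD, List.getElem?_cons_zero, List.getElem?_cons_succ,
        Option.getD_some]
      rw [row_eq, row_eq, row_eq, row_eq]

-- ===== VERDICT (by name: the statement is the Claim_ definition above) =====
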